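-- pv_equiv track=rewrite | github.com/pypi-data/pypi-mirror-382 | packages/datadict-cli/datadict_cli-0.0.2-py3-none-any.whl/datadict_cli/lib/queries.py | _generate_key_variations
-- ===== SOURCE A (Python) =====
-- def _generate_key_variations(key: str) -> list[str]:
--     """Relax matching by dropping leading segments from dotted keys."""
--     parts = [segment for segment in key.split(".") if segment]
--     if not parts:
--         return []
--
--     variations: list[str] = []
--     for index in range(len(parts)):
--         variations.append(".".join(parts[index:]))
--     return variations
-- ===== SOURCE B (Python) =====
-- def _generate_key_variations(key: str) -> list[str]:
--     """Relax matching by dropping leading segments from dotted keys."""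
--     out: list[str] = []
--     suffix = ""
--     for seg in reversed(key.split(".")):
--         if not seg:
--             continue
--         suffix = seg if not out else seg + "." + suffix
--         out.append(suffix)
--     out.reverse()
--     return out
-- ===== Notes on version B (the rewrite author's own statement) =====
-- stated objective: alternative
-- what changed: Instead of re-slicing and re-joining the segment list for every start index, B walks the segments once from last to first, extending one accumulator string (seg + '.' + suffix) and reversing the collected suffixes at the end.
import Mathlib
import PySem

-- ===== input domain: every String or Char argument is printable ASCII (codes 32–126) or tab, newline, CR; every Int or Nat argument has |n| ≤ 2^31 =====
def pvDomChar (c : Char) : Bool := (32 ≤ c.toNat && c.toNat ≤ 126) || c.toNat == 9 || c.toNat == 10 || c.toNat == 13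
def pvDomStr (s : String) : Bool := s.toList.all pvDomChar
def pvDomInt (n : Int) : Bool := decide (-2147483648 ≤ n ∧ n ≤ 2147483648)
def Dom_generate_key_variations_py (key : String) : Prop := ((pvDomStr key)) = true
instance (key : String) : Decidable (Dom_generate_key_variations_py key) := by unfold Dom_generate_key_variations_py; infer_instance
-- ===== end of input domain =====

-- B replaces A's per-index slice-and-join with a single right-to-left pass extending one
-- accumulator suffix (alternative decomposition; same asymptotic cost in the output size).


-- ===== PORT A =====
-- key.split(".") → Str.split? with the literal non-empty separator "." (never none), parts[index:] → slice
def generate_key_variations_py (key : String) : List String :=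
  let parts := ((PySem.Str.split? key ".").getD []).filter (fun s => s != "")
  if parts = [] then []
  else
    (PySem.List.pyRange 0 parts.length 1).foldl
      (fun variations index =>
        variations ++ [PySem.Str.join "." (PySem.List.slice parts (some index) none)]) []

-- ===== PORT B =====
-- Source B's loop over reversed(key.split(".")) with state (out, suffix);
-- seg + "." + suffix is ported exactly as PySem.Str.join "." [seg, suffix]
def generate_key_variations_py_alt (key : String) : List String :=
  let st := ((PySem.Str.split? key ".").getD []).reverse.foldl
    (fun (st : List String × String) seg =>
      if seg == "" then st
      else
        let suffix := if st.1.isEmpty then seg else PySem.Str.join "." [seg, st.2]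
        (st.1 ++ [suffix], suffix))
    ([], "")
  st.1.reverse

-- ===== PRECONDITION & SPEC =====
def Spec_generate_key_variations_py (key : String) (out : List String) : Prop := out = generate_key_variations_py_alt key
instance (key : String) (out : List String) : Decidable (Spec_generate_key_variations_py key out) := by unfold Spec_generate_key_variations_py; infer_instance

-- ===== CLAIM (what is proved, stated in full; the proofs are below) =====
def Claim_equal_generate_key_variations_py : Prop := ∀ (key : String), Dom_generate_key_variations_py key → Spec_generate_key_variations_py key (generate_key_variations_py key)

-- ===== LEMMAS AND PROOFS =====

-- B's loop step (after the empty-segment guard has been discharged)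
def gkvStep (st : List String × String) (seg : String) : List String × String :=
  if seg == "" then st
  else
    let suffix := if st.1.isEmpty then seg else PySem.Str.join "." [seg, st.2]
    (st.1 ++ [suffix], suffix)

theorem gkvStep_skip (st : List String × String) (seg : String) (h : (seg != "") = false) :
    gkvStep st seg = st := by
  simp only [gkvStep]
  simp only [bne, Bool.not_eq_false'] at h
  simp [h]

-- the guarded fold over any list equals the fold over its non-empty segments
theorem gkvFold_filter (l : List String) (st : List String × String) :
    l.foldl gkvStep st = (l.filter (fun s => s != "")).foldl gkvStep st := by
  induction l generalizing st with
  | nil => rfl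
  | cons s rest ih =>
    by_cases h : (s != "") = true
    · simp [h, ih]
    · simp only [Bool.not_eq_true] at h
      simp [h, gkvStep_skip st s h, ih]

theorem str_join_singleton (s : String) : PySem.Str.join "." [s] = s := by
  apply String.toList_injective
  simp [PySem.Str.toList_join, PySem.Chars.join_singleton]

theorem str_join_two (s t : String) (ts : List String) :
    PySem.Str.join "." [s, PySem.Str.join "." (t :: ts)] = PySem.Str.join "." (s :: t :: ts) := by
  apply String.toList_injective
  simp [PySem.Str.toList_join, PySem.Chars.join_cons_cons, PySem.Chars.join_singleton]

-- the suffix list both programs compute, as a map over start indices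
def gkvSuffixes (q : List String) : List String :=
  (List.range q.length).map (fun k => PySem.Str.join "." (q.drop k))

theorem gkvFold_spec (q : List String) (hq : q ≠ []) (hne : ∀ s ∈ q, (s != "") = true) :
    q.reverse.foldl gkvStep ([], "") = ((gkvSuffixes q).reverse, PySem.Str.join "." q) := by
  induction q with
  | nil => exact absurd rfl hq
  | cons s rest ih =>
    have hs : (s != "") = true := hne s (List.mem_cons_self ..)
    rw [List.reverse_cons, List.foldl_append]
    have hs' : (s == "") = false := by simpa [bne] using hs
    cases rest with
    | nil =>
      simp only [List.reverse_nil, List.foldl_nil, List.foldl_cons, gkvStep, hs']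
      simp [gkvSuffixes, str_join_singleton]
    | cons t ts =>
      rw [ih (by simp) (fun x hx => hne x (List.mem_cons_of_mem _ hx))]
      have hlen : ((gkvSuffixes (t :: ts)).reverse).isEmpty = false := by
        simp [gkvSuffixes]
      simp only [List.foldl_cons, List.foldl_nil, gkvStep, hs', Bool.false_eq_true, if_false,
        hlen, str_join_two]
      simp only [Prod.mk.injEq]
      refine ⟨?_, trivial⟩
      -- suffix lists match: range (n+1) = 0 :: map succ (range n)
      simp only [gkvSuffixes, List.length_cons, List.range_succ_eq_map,
        List.map_cons, List.map_map, List.reverse_cons, List.drop_zero]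
      rfl

theorem gkvA_eq_suffixes (parts : List String) :
    (PySem.List.pyRange 0 parts.length 1).foldl
      (fun variations index =>
        variations ++ [PySem.Str.join "." (PySem.List.slice parts (some index) none)]) []
      = gkvSuffixes parts := by
  rw [PySem.List.pyRange_one, List.foldl_map, PySem.List.foldl_append_singleton_eq_map]
  simp only [gkvSuffixes, Int.sub_zero, Int.toNat_natCast, List.nil_append]
  apply List.map_congr_left
  intro k _
  rw [Int.zero_add, PySem.List.slice_from_natCast]

-- ===== VERDICT (by name: the statement is the Claim_ definition above) =====
theorem generate_key_variations_py_spec : Claim_equal_generate_key_variations_py := by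
  intro key _
  unfold Spec_generate_key_variations_py generate_key_variations_py generate_key_variations_py_alt
  set l := (PySem.Str.split? key ".").getD [] with hl
  simp only
  have hfold : l.reverse.foldl gkvStep ([], "")
      = (l.reverse.filter (fun s => s != "")).foldl gkvStep ([], "") := gkvFold_filter _ _
  rw [List.filter_reverse] at hfold
  set parts := l.filter (fun s => s != "") with hp
  by_cases h : parts = []
  · show (if parts = [] then _ else _) = _
    rw [if_pos h]
    show _ = (List.foldl gkvStep ([],"") l.reverse).1.reverse
    rw [hfold, h]
    rfl
  · show (if parts = [] then _ else _) = _
    rw [if_neg h]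
    show _ = (List.foldl gkvStep ([],"") l.reverse).1.reverse
    rw [hfold, gkvFold_spec parts h (fun s hs => (List.mem_filter.mp hs).2),
      gkvA_eq_suffixes parts]
    simp
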